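-- pv_equiv track=rewrite | github.com/elfanmar10/dts-python-2020 | project/p3.py | send_batch
-- ===== SOURCE A (Python) =====
-- def caesar_encript(txt,shift):
--   pass
--   result = ""
--   for char in txt:
--      if char.isalpha():
--         result += chr((ord(char) + shift-65) % 26 + 65) if char.isupper() else chr((ord(char) + shift-97) % 26 + 97)
--      else:
--         result += chr(ord(char))
--   return result
--
-- def shuffle_order(txt,order):
--   return ''.join([txt[i] for i in order])
--
-- def send_batch(txt,batch_order,shift=3):
--   pass
--   text = caesar_encript(txt,shift)
--   n = len(batch_order)
--   list = [text[i:i+n] for i in range(0, len(text), n)]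
--   batch_cpr=[]
--   for i in range (len(list)):
--
--     if len(list[i]) < n:
--        list[i] += '_'* (n - len(list[i]))
--        new_list = shuffle_order(list[i],batch_order)
--     else:
--        new_list = shuffle_order(list[i],batch_order)
--     batch_cpr += [new_list]
--   return batch_cpr
-- ===== SOURCE B (Python) =====
-- def send_batch(txt, batch_order, shift=3):
--     # Single pass: inline per-char Caesar arithmetic, then consume the encrypted
--     # string n chars at a time (pad with ljust), no intermediate slice list.
--     n = len(batch_order)
--     enc = []
--     for c in txt:
--         o = ord(c)
--         if 65 <= o <= 90:
--             o = (o - 65 + shift) % 26 + 65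
--         elif 97 <= o <= 122:
--             o = (o - 97 + shift) % 26 + 97
--         enc.append(chr(o))
--     text = ''.join(enc)
--     out = []
--     while text:
--         chunk = text[:n].ljust(n, '_')
--         out.append(''.join(chunk[i] for i in batch_order))
--         text = text[n:]
--     return out
-- ===== Notes on version B (the rewrite author's own statement) =====
-- stated objective: simpler
-- what changed: B inlines the Caesar arithmetic per character and consumes the encrypted string one n-sized chunk at a time in a single while loop (ljust-pad every chunk, index it directly), instead of A's helper functions plus a slice-built chunk list traversed by index with a conditional padding branch.
import Mathlib
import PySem

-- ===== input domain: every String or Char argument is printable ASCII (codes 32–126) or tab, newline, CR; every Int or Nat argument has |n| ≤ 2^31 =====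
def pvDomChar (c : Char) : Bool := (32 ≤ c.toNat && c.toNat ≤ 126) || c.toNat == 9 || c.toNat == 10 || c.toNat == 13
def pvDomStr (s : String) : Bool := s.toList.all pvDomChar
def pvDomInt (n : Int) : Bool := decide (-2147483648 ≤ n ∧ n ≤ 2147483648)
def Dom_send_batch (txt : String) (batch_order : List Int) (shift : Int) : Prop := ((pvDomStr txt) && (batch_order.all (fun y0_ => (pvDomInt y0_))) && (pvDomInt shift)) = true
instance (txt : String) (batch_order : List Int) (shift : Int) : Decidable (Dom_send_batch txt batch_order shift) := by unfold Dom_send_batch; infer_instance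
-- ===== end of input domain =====

-- B inlines the Caesar arithmetic per character and consumes the encrypted string one
-- n-sized chunk at a time (always padding with ljust), instead of A's helper functions,
-- slice-built chunk list and conditional-padding branch; same cost, simpler decomposition.

-- ===== PORT A =====
-- caesar_encript: the string result is carried as List Char, accumulated by appending as in A
def caesarCharsA (txt : List Char) (shift : Int) : List Char :=
  txt.foldl (fun result char =>
    if PySem.Str.isalpha char then
      if PySem.Str.isupper char then
        result ++ [Char.ofNat (PySem.Int.mod ((char.toNat : Int) + shift - 65) 26 + 65).toNat]
      else
        result ++ [Char.ofNat (PySem.Int.mod ((char.toNat : Int) + shift - 97) 26 + 97).toNat]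
    else
      result ++ [Char.ofNat char.toNat]) []

-- shuffle_order: ''.join of a comprehension = map; the '_' default is never read under Pre_
-- (Python raises IndexError on an out-of-range index)
def shuffle_order (txt : List Char) (order : List Int) : List Char :=
  order.map (fun i => (PySem.List.pyGet? txt i).getD '_')

def send_batch (txt : String) (batch_order : List Int) (shift : Int) : List String :=
  let text := caesarCharsA txt.toList shift
  let n : Int := batch_order.length
  let lst := (PySem.List.pyRange 0 (PySem.List.len text) n).map
      (fun i => PySem.List.slice text (some i) (some (i + n)))
  (PySem.List.pyRange 0 (PySem.List.len lst) 1).foldl (fun batch_cpr i =>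
    if ((PySem.List.pyGetD lst i []).length : Int) < n then
      batch_cpr ++ [String.ofList (shuffle_order ((PySem.List.pyGetD lst i []) ++ List.replicate (n - ((PySem.List.pyGetD lst i []).length : Int)).toNat '_') batch_order)]
    else
      batch_cpr ++ [String.ofList (shuffle_order (PySem.List.pyGetD lst i []) batch_order)]) []

-- ===== PORT B =====
-- inline per-char Caesar arithmetic (Source B's for-loop over txt)
def caesarCharsB (shift : Int) (txt : List Char) : List Char :=
  txt.foldl (fun enc c =>
    let o : Int := (c.toNat : Int)
    let o' : Int :=
      if 65 ≤ o ∧ o ≤ 90 then PySem.Int.mod (o - 65 + shift) 26 + 65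
      else if 97 ≤ o ∧ o ≤ 122 then PySem.Int.mod (o - 97 + shift) 26 + 97
      else o
    enc ++ [Char.ofNat o'.toNat]) []

-- Source B's while loop: chunk = text[:n].ljust(n,'_') (take + replicate, exact for n : Nat ≥ 0),
-- then text = text[n:].  The n = 0 disjunct is a totality guard only (Python A raises there;
-- excluded by Pre_).
def batchLoopB (n : Nat) (order : List Int) (text : List Char) : List String :=
  if text.isEmpty ∨ n = 0 then []
  else
    let chunk := text.take n ++ List.replicate (n - (text.take n).length) '_'
    String.ofList (order.map (fun i => (PySem.List.pyGet? chunk i).getD '_'))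
      :: batchLoopB n order (text.drop n)
termination_by text.length
decreasing_by
  simp only [List.length_drop]
  rcases text with _ | ⟨c, cs⟩
  · simp_all
  · simp_all; omega

def send_batch_alt (txt : String) (batch_order : List Int) (shift : Int) : List String :=
  batchLoopB batch_order.length batch_order (caesarCharsB shift txt.toList)

-- ===== PRECONDITION & SPEC =====
-- Pre_ = exactly where Python A returns: batch_order nonempty (n = 0 makes range(0, len, 0)
-- raise ValueError), and unless the text is empty (then no batch is ever indexed) every
-- element of batch_order is a valid Python index into a length-n batch (else IndexError).
def Pre_send_batch (txt : String) (batch_order : List Int) (shift : Int) : Prop :=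
  1 ≤ batch_order.length ∧
    (txt.toList = [] ∨ ∀ i ∈ batch_order, -(batch_order.length : Int) ≤ i ∧ i < (batch_order.length : Int))
instance (txt : String) (batch_order : List Int) (shift : Int) : Decidable (Pre_send_batch txt batch_order shift) := by unfold Pre_send_batch; infer_instance
def pvWitness_send_batch : String × List Int × Int := ("Hello, World!", [2, 0, 1], 3)

def Spec_send_batch (txt : String) (batch_order : List Int) (shift : Int) (out : List String) : Prop := out = send_batch_alt txt batch_order shift
instance (txt : String) (batch_order : List Int) (shift : Int) (out : List String) : Decidable (Spec_send_batch txt batch_order shift out) := by unfold Spec_send_batch; infer_instance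

-- ===== CLAIM (what is proved, stated in full; the proofs are below) =====
def Claim_equal_send_batch : Prop := ∀ (txt : String) (batch_order : List Int) (shift : Int), Dom_send_batch txt batch_order shift → Pre_send_batch txt batch_order shift → Spec_send_batch txt batch_order shift (send_batch txt batch_order shift)

-- ===== LEMMAS AND PROOFS =====

theorem isupper_iff (c : Char) : (PySem.Str.isupper c = true) ↔ (65 ≤ (c.toNat:Int) ∧ (c.toNat:Int) ≤ 90) := by
  simp [PySem.Str.isupper, PySem.Chars.isupper]
  constructor
  · rintro ⟨h1, h2⟩
    have g1 : ('A').toNat ≤ c.toNat := h1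
    have g2 : c.toNat ≤ ('Z').toNat := h2
    have e1 : ('A').toNat = 65 := rfl
    have e2 : ('Z').toNat = 90 := rfl
    omega
  · rintro ⟨h1, h2⟩
    have e1 : ('A').toNat = 65 := rfl
    have e2 : ('Z').toNat = 90 := rfl
    exact ⟨show ('A').toNat ≤ c.toNat by omega, show c.toNat ≤ ('Z').toNat by omega⟩

theorem islower_iff (c : Char) : (PySem.Chars.islower c = true) ↔ (97 ≤ (c.toNat:Int) ∧ (c.toNat:Int) ≤ 122) := by
  simp [PySem.Chars.islower]
  constructor
  · rintro ⟨h1, h2⟩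
    have g1 : ('a').toNat ≤ c.toNat := h1
    have g2 : c.toNat ≤ ('z').toNat := h2
    have e1 : ('a').toNat = 97 := rfl
    have e2 : ('z').toNat = 122 := rfl
    omega
  · rintro ⟨h1, h2⟩
    have e1 : ('a').toNat = 97 := rfl
    have e2 : ('z').toNat = 122 := rfl
    exact ⟨show ('a').toNat ≤ c.toNat by omega, show c.toNat ≤ ('z').toNat by omega⟩

theorem caesar_eq (shift : Int) (t : List Char) :
    caesarCharsA t shift = caesarCharsB shift t := by
  unfold caesarCharsA caesarCharsB
  apply PySem.List.foldl_congr_mem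
  intro acc c _
  show _ = acc ++ [Char.ofNat (if 65 ≤ (c.toNat:Int) ∧ (c.toNat:Int) ≤ 90 then PySem.Int.mod ((c.toNat:Int) - 65 + shift) 26 + 65
      else if 97 ≤ (c.toNat:Int) ∧ (c.toNat:Int) ≤ 122 then PySem.Int.mod ((c.toNat:Int) - 97 + shift) 26 + 97
      else (c.toNat:Int)).toNat]
  by_cases hU : 65 ≤ (c.toNat:Int) ∧ (c.toNat:Int) ≤ 90
  · have h1 : PySem.Str.isupper c = true := (isupper_iff c).mpr hU
    have h2 : PySem.Str.isalpha c = true := by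
      simp [PySem.Str.isalpha, PySem.Chars.isalpha, PySem.Str.isupper] at *; left; exact h1
    rw [if_pos h2, if_pos h1, if_pos hU]
    have : (c.toNat:Int) + shift - 65 = (c.toNat:Int) - 65 + shift := by ring
    rw [this]
  · by_cases hL : 97 ≤ (c.toNat:Int) ∧ (c.toNat:Int) ≤ 122
    · have h1 : PySem.Chars.islower c = true := (islower_iff c).mpr hL
      have h1' : PySem.Str.isupper c ≠ true := fun h => hU ((isupper_iff c).mp h)
      have h2 : PySem.Str.isalpha c = true := by
        simp [PySem.Str.isalpha, PySem.Chars.isalpha]; right; exact h1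
      rw [if_pos h2, if_neg h1', if_neg hU, if_pos hL]
      have : (c.toNat:Int) + shift - 97 = (c.toNat:Int) - 97 + shift := by ring
      rw [this]
    · have h2 : PySem.Str.isalpha c ≠ true := by
        simp [PySem.Str.isalpha, PySem.Chars.isalpha]
        constructor
        · rw [Bool.eq_false_iff]; exact fun h => hU ((isupper_iff c).mp h)
        · rw [Bool.eq_false_iff]; exact fun h => hL ((islower_iff c).mp h)
      rw [if_neg h2, if_neg hU, if_neg hL]
      simp

-- the per-chunk transform applied by A's loop body
def chunkG (n : Int) (order : List Int) (c : List Char) : String :=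
  if (c.length : Int) < n then
    String.ofList (shuffle_order (c ++ List.replicate (n - (c.length : Int)).toNat '_') order)
  else
    String.ofList (shuffle_order c order)

-- A's chunk list
def chunksN (N : Nat) (t : List Char) : List (List Char) :=
  (PySem.List.pyRange 0 (PySem.List.len t) (N : Int)).map
    (fun i => PySem.List.slice t (some i) (some (i + (N : Int))))

theorem send_batch_eq_mapG (txt : String) (order : List Int) (shift : Int) :
    send_batch txt order shift
      = (chunksN order.length (caesarCharsA txt.toList shift)).map
          (chunkG (order.length : Int) order) := by
  unfold send_batch chunksN
  refine Eq.trans (PySem.List.foldl_pyRange_pyGetD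
    ((PySem.List.pyRange 0 (PySem.List.len (caesarCharsA txt.toList shift)) (order.length : Int)).map
      (fun i => PySem.List.slice (caesarCharsA txt.toList shift) (some i) (some (i + (order.length : Int)))))
    ([] : List Char)
    (fun acc c =>
      if ((c.length : Int)) < (order.length : Int) then
        acc ++ [String.ofList (shuffle_order (c ++ List.replicate (((order.length : Int)) - (c.length : Int)).toNat '_') order)]
      else
        acc ++ [String.ofList (shuffle_order c order)])
    ([] : List String) (le_refl 0)) ?_
  rw [show ((0:Int).toNat) = 0 from rfl, List.drop_zero]
  rw [PySem.List.foldl_congr_mem _ _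
    (fun acc c => acc ++ [chunkG (order.length : Int) order c]) []
    (by intro acc c _
        unfold chunkG
        by_cases h : ((c.length : Int)) < (order.length : Int) <;> simp [h])]
  rw [PySem.List.foldl_append_singleton_eq_map]
  simp

theorem chunksN_nil (N : Nat) (hN : 1 ≤ N) : chunksN N [] = [] := by
  unfold chunksN
  rw [PySem.List.pyRange_of_pos 0 (PySem.List.len ([] : List Char)) (by exact_mod_cast hN)]
  simp [PySem.List.len]

theorem chunksN_cons (N : Nat) (hN : 1 ≤ N) (t : List Char) (ht : t ≠ []) :
    chunksN N t = t.take N :: chunksN N (t.drop N) := by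
  have hN' : (0:Int) < (N:Int) := by exact_mod_cast hN
  have hM : 1 ≤ t.length := List.length_pos_iff.mpr ht
  unfold chunksN
  rw [PySem.List.pyRange_of_pos 0 _ hN', PySem.List.pyRange_of_pos 0 _ hN']
  simp only [PySem.List.len, List.map_map, List.length_drop]
  have count1 : (if (0:Int) < ((t.length:Int)) then (((t.length:Int) - 0 + (N:Int) - 1) / (N:Int)).toNat else 0)
      = (t.length + N - 1) / N := by
    rw [if_pos (by exact_mod_cast hM)]
    have e : ((t.length:Int) - 0 + (N:Int) - 1) = ((t.length + N - 1 : Nat) : Int) := by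
      push_cast [Nat.cast_sub (by omega : 1 ≤ t.length + N)]; ring
    rw [e, Int.ofNat_ediv_ofNat, Int.toNat_natCast]
  have count2 : (if (0:Int) < ((t.length - N : Nat) : Int) then ((((t.length - N : Nat) : Int) - 0 + (N:Int) - 1) / (N:Int)).toNat else 0)
      = (t.length + N - 1) / N - 1 := by
    by_cases hgt : N < t.length
    · rw [if_pos (by exact_mod_cast (by omega : 0 < t.length - N))]
      have e : (((t.length - N : Nat) : Int) - 0 + (N:Int) - 1) = ((t.length - N + N - 1 : Nat) : Int) := by
        push_cast [Nat.cast_sub (by omega : N ≤ t.length), Nat.cast_sub (by omega : 1 ≤ t.length - N + N)]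
        ring
      rw [e, Int.ofNat_ediv_ofNat, Int.toNat_natCast]
      have e2 : t.length + N - 1 = (t.length - N + N - 1) + N := by omega
      rw [e2, Nat.add_div_right _ (by omega : 0 < N), Nat.add_sub_cancel]
    · rw [if_neg (by simp; omega)]
      have e2 : (t.length + N - 1) / N = 1 := by
        apply Nat.div_eq_of_lt_le <;> omega
      omega
  rw [count1, count2]
  have hcount : (t.length + N - 1) / N = ((t.length + N - 1) / N - 1) + 1 := by
    have : N ≤ t.length + N - 1 := by omega
    have : 1 ≤ (t.length + N - 1) / N := (Nat.one_le_div_iff (by omega)).mpr this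
    omega
  rw [hcount, List.range_succ_eq_map, List.map_cons, List.map_map]
  congr 1
  · show PySem.List.slice t (some (0 + (N:Int) * (0:Nat))) (some (0 + (N:Int) * (0:Nat) + (N:Int))) = t.take N
    simp only [Nat.cast_zero, mul_zero, add_zero, zero_add]
    rw [PySem.List.slice_zero_start, PySem.List.slice_to_natCast]
  · apply List.map_congr_left
    intro k _
    show PySem.List.slice t (some (0 + (N:Int) * ((k.succ : Nat) : Int))) (some (0 + (N:Int) * ((k.succ : Nat) : Int) + (N:Int)))
        = PySem.List.slice (t.drop N) (some (0 + (N:Int) * (k : Int))) (some (0 + (N:Int) * (k : Int) + (N:Int)))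
    have e1 : (0 + (N:Int) * ((k.succ : Nat) : Int)) = ((N * (k+1) : Nat) : Int) := by push_cast; ring
    have e2 : (0 + (N:Int) * ((k : Nat) : Int)) = ((N * k : Nat) : Int) := by push_cast; ring
    rw [e1, e2]
    rw [show (((N * (k+1) : Nat) : Int) + (N:Int)) = (((N * (k+1) : Nat) : Int) + ((N:Nat) : Int)) from rfl]
    rw [show (((N * k : Nat) : Int) + (N:Int)) = (((N * k : Nat) : Int) + ((N:Nat) : Int)) from rfl]
    rw [PySem.List.slice_natCast_add, PySem.List.slice_natCast_add, List.drop_drop]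
    have e3 : N * (k + 1) = N + N * k := by ring
    rw [e3]

theorem mapG_eq_loop (N : Nat) (hN : 1 ≤ N) (order : List Int) (t : List Char) :
    (chunksN N t).map (chunkG (N : Int) order) = batchLoopB N order t := by
  suffices H : ∀ (L : Nat) (t : List Char), t.length = L →
      (chunksN N t).map (chunkG (N : Int) order) = batchLoopB N order t by
    exact H t.length t rfl
  intro L
  induction L using Nat.strong_induction_on with
  | _ L IH =>
    intro t hL
    by_cases ht : t = []
    · subst ht
      rw [chunksN_nil N hN, batchLoopB]
      simp
    · have hpos : 1 ≤ t.length := List.length_pos_iff.mpr ht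
      rw [chunksN_cons N hN t ht, batchLoopB,
        if_neg (by simp only [List.isEmpty_iff, ht, false_or]; omega)]
      rw [List.map_cons]
      show chunkG (N : Int) order (t.take N) :: (chunksN N (t.drop N)).map (chunkG (N : Int) order)
          = String.ofList (order.map (fun i =>
              (PySem.List.pyGet? (t.take N ++ List.replicate (N - (t.take N).length) '_') i).getD '_'))
            :: batchLoopB N order (t.drop N)
      congr 1
      · unfold chunkG shuffle_order
        have hc : (t.take N).length = min N t.length := List.length_take
        by_cases hlt : ((t.take N).length : Int) < (N : Int)
        · rw [if_pos hlt]
          have e : ((N : Int) - ((t.take N).length : Int)).toNat = N - (t.take N).length := by omega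
          rw [e]
        · rw [if_neg hlt]
          have e : N - (t.take N).length = 0 := by omega
          rw [e]
          simp
      · exact IH ((t.drop N).length) (by simp only [List.length_drop]; omega) (t.drop N) rfl

-- ===== VERDICT (by name: the statement is the Claim_ definition above) =====
theorem send_batch_spec : Claim_equal_send_batch := by
  intro txt order shift _hDom hPre
  unfold Spec_send_batch send_batch_alt
  rw [send_batch_eq_mapG, caesar_eq, mapG_eq_loop order.length hPre.1]
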